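-- pv_equiv track=rewrite | github.com/FrankDesogus/log_analyzer | src/correlation.py | _derive_canonical_event_type
-- ===== SOURCE A (Python) =====
-- from typing import Any, Optional
--
-- def _derive_canonical_event_type(
--     event_types: set[str],
--     event_categories: Optional[set[str]] = None,
--     process_names: Optional[set[str]] = None,
-- ) -> str:
--     if not event_types:
--         return "wifi_unknown_sequence"
--
--     known_event_types = {event_type for event_type in event_types if event_type != "unknown"}
--     if not known_event_types:
--         return "wifi_unknown_sequence"
--
--     has_auth = "auth_request" in event_types or "auth_response" in event_types
--     has_disconnect = "disconnect" in event_types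
--     has_eapol_flow = any(event_type in {"eapol_key", "eapol_packet", "eap_packet"} for event_type in event_types)
--     has_assoc_flow = any(
--         event_type
--         in {
--             "station_join",
--             "assoc_success",
--             "reassoc_request",
--             "reassoc_response",
--             "station_table_insert",
--             "cfg80211_assoc_request_handler",
--             "station_qos_map_support",
--         }
--         for event_type in event_types
--     )
--     has_assoc_failure = "assoc_tracker_failure" in event_types
--     has_roam_flow = any(
--         event_type
--         in {
--             "reassoc_request",
--             "reassoc_response",
--             "assoc_success",
--             "reassoc_processing_time",
--             "fast_transition_roam",
--             "rrm_neighbor_response",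
--         }
--         for event_type in event_types
--     )
--     has_dns_anomaly = "dns_timeout" in event_types
--     has_device_mgmt_report = "device_config_report" in event_types
--     has_wifi_scan_error = "wifi_scan_error" in event_types
--     has_system_maintenance = "system_cache_drop" in event_types
--     process_names_normalized = {name.lower() for name in (process_names or set())}
--     has_device_mgmt_process = bool({"mcad", "syswrapper", "logread", "procd"} & process_names_normalized)
--     has_device_mgmt_category = bool({"device_management", "controller_config"} & set(event_categories or set()))
--     has_disconnect_flow = any(
--         event_type
--         in {
--             "station_delete",
--             "cfg80211_station_delete",
--             "cfg80211_station_delete_start",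
--             "cfg80211_station_delete_end",
--             "station_table_delete",
--             "driver_missing_station_entry",
--             "deauth_sent",
--             "wifi_key_delete",
--             "disconnect",
--         }
--         for event_type in event_types
--     )
--
--     if has_auth and has_disconnect:
--         return "wifi_auth_disconnect_sequence"
--     if has_auth and has_disconnect_flow:
--         return "wifi_auth_disconnect_sequence"
--     if has_eapol_flow:
--         return "wifi_eapol_handshake_sequence"
--     if has_system_maintenance:
--         return "system_maintenance_sequence"
--     if has_wifi_scan_error:
--         return "wifi_system_sequence"
--     if has_device_mgmt_report or has_device_mgmt_process or has_device_mgmt_category: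
--         return "device_management_sequence"
--     if has_assoc_failure and (has_auth or has_disconnect or has_disconnect_flow):
--         return "wifi_auth_disconnect_sequence"
--     if has_assoc_failure:
--         return "wifi_assoc_failure_sequence"
--     if has_roam_flow:
--         return "wifi_roam_sequence"
--     if has_dns_anomaly:
--         return "network_dns_anomaly_sequence"
--     if has_assoc_flow:
--         return "wifi_association_sequence"
--     if has_auth and not has_disconnect:
--         return "wifi_auth_sequence"
--     if has_disconnect and event_types.issubset({"disconnect"}):
--         return "wifi_disconnect_sequence"
--     if has_disconnect_flow:
--         return "wifi_disconnect_sequence"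
--
--     return "wifi_unknown_sequence"
-- ===== SOURCE B (Python) =====
-- from typing import Optional
--
-- # Each event type is mapped once to the signal flags it contributes; one pass
-- # over event_types accumulates the flag set (disconnect is part of the
-- # disconnect-flow signal, which makes several of A's branches coincide).
-- _EVENT_FLAGS = {
--     "auth_request": ("auth",),
--     "auth_response": ("auth",),
--     "disconnect": ("disconnect_flow",),
--     "eapol_key": ("eapol",),
--     "eapol_packet": ("eapol",),
--     "eap_packet": ("eapol",),
--     "station_join": ("assoc",),
--     "assoc_success": ("assoc", "roam"),
--     "reassoc_request": ("assoc", "roam"),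
--     "reassoc_response": ("assoc", "roam"),
--     "station_table_insert": ("assoc",),
--     "cfg80211_assoc_request_handler": ("assoc",),
--     "station_qos_map_support": ("assoc",),
--     "assoc_tracker_failure": ("assoc_failure",),
--     "reassoc_processing_time": ("roam",),
--     "fast_transition_roam": ("roam",),
--     "rrm_neighbor_response": ("roam",),
--     "dns_timeout": ("dns",),
--     "device_config_report": ("mgmt_report",),
--     "wifi_scan_error": ("scan_error",),
--     "system_cache_drop": ("maintenance",),
--     "station_delete": ("disconnect_flow",),
--     "cfg80211_station_delete": ("disconnect_flow",),
--     "cfg80211_station_delete_start": ("disconnect_flow",),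
--     "cfg80211_station_delete_end": ("disconnect_flow",),
--     "station_table_delete": ("disconnect_flow",),
--     "driver_missing_station_entry": ("disconnect_flow",),
--     "deauth_sent": ("disconnect_flow",),
--     "wifi_key_delete": ("disconnect_flow",),
-- }
--
--
-- def _derive_canonical_event_type(
--     event_types: set[str],
--     event_categories: Optional[set[str]] = None,
--     process_names: Optional[set[str]] = None,
-- ) -> str:
--     flags: set[str] = set()
--     known = False
--     for event_type in event_types:
--         if event_type != "unknown":
--             known = True
--         flags.update(_EVENT_FLAGS.get(event_type, ()))
--     if not known:
--         return "wifi_unknown_sequence"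
--
--     mgmt = (
--         "mgmt_report" in flags
--         or any(p.lower() in {"mcad", "syswrapper", "logread", "procd"} for p in (process_names or ()))
--         or any(c in {"device_management", "controller_config"} for c in (event_categories or ()))
--     )
--
--     rules = [
--         ("auth" in flags and "disconnect_flow" in flags, "wifi_auth_disconnect_sequence"),
--         ("eapol" in flags, "wifi_eapol_handshake_sequence"),
--         ("maintenance" in flags, "system_maintenance_sequence"),
--         ("scan_error" in flags, "wifi_system_sequence"),
--         (mgmt, "device_management_sequence"),
--         ("assoc_failure" in flags and ("auth" in flags or "disconnect_flow" in flags),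
--          "wifi_auth_disconnect_sequence"),
--         ("assoc_failure" in flags, "wifi_assoc_failure_sequence"),
--         ("roam" in flags, "wifi_roam_sequence"),
--         ("dns" in flags, "network_dns_anomaly_sequence"),
--         ("assoc" in flags, "wifi_association_sequence"),
--         ("auth" in flags, "wifi_auth_sequence"),
--         ("disconnect_flow" in flags, "wifi_disconnect_sequence"),
--     ]
--     for cond, label in rules:
--         if cond:
--             return label
--     return "wifi_unknown_sequence"
-- ===== Notes on version B (the rewrite author's own statement) =====
-- stated objective: alternative
-- what changed: Replaces A's twelve independent membership scans and long if/return cascade with a single pass over event_types that accumulates a flag set via a per-event lookup table, plus a priority rule table scanned once; branches that provably coincide (disconnect is part of the disconnect-flow signal) are merged.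
import Mathlib
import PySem

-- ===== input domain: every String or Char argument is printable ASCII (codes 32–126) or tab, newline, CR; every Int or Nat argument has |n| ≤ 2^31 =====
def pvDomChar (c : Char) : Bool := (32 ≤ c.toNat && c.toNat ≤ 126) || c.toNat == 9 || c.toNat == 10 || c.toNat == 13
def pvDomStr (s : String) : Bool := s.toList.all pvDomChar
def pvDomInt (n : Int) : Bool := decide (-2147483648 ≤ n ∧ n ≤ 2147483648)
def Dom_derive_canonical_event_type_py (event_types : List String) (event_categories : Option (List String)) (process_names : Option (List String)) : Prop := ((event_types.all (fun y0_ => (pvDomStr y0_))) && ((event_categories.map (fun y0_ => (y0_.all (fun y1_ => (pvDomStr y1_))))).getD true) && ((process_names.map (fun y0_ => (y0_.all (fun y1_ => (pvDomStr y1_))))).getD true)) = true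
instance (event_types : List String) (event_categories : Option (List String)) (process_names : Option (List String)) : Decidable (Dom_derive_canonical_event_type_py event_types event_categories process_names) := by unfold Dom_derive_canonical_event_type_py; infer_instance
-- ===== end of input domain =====

-- B replaces A's dozen independent membership scans and long if/return cascade by a single pass over
-- event_types that accumulates a flag set via a per-event lookup table, then scans a priority rule table
-- (objective: alternative; return-value equivalence proved below).


-- ===== PORT A =====
-- Port of A: each flag recomputed by its own membership scan, then the if/return cascade, step for step.
def derive_canonical_event_type_py (event_types : List String) (event_categories : Option (List String)) (process_names : Option (List String)) : String :=
  if event_types.isEmpty then "wifi_unknown_sequence" else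
  let known_event_types : PySem.Set String := PySem.Set.ofList (event_types.filter (fun event_type => event_type != "unknown"))
  if known_event_types.isEmpty then "wifi_unknown_sequence" else
  let has_auth := event_types.contains "auth_request" || event_types.contains "auth_response"
  let has_disconnect := event_types.contains "disconnect"
  let has_eapol_flow := event_types.any (fun event_type => ["eapol_key", "eapol_packet", "eap_packet"].contains event_type)
  let has_assoc_flow := event_types.any (fun event_type => ["station_join", "assoc_success", "reassoc_request", "reassoc_response", "station_table_insert", "cfg80211_assoc_request_handler", "station_qos_map_support"].contains event_type)
  let has_assoc_failure := event_types.contains "assoc_tracker_failure"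
  let has_roam_flow := event_types.any (fun event_type => ["reassoc_request", "reassoc_response", "assoc_success", "reassoc_processing_time", "fast_transition_roam", "rrm_neighbor_response"].contains event_type)
  let has_dns_anomaly := event_types.contains "dns_timeout"
  let has_device_mgmt_report := event_types.contains "device_config_report"
  let has_wifi_scan_error := event_types.contains "wifi_scan_error"
  let has_system_maintenance := event_types.contains "system_cache_drop"
  let process_names_normalized : PySem.Set String := PySem.Set.ofList ((process_names.getD []).map (fun name => PySem.Str.lower name))
  let has_device_mgmt_process := !(PySem.Set.inter (PySem.Set.ofList ["mcad", "syswrapper", "logread", "procd"]) process_names_normalized).isEmpty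
  let has_device_mgmt_category := !(PySem.Set.inter (PySem.Set.ofList ["device_management", "controller_config"]) (PySem.Set.ofList (event_categories.getD []))).isEmpty
  let has_disconnect_flow := event_types.any (fun event_type => ["station_delete", "cfg80211_station_delete", "cfg80211_station_delete_start", "cfg80211_station_delete_end", "station_table_delete", "driver_missing_station_entry", "deauth_sent", "wifi_key_delete", "disconnect"].contains event_type)
  if has_auth && has_disconnect then "wifi_auth_disconnect_sequence"
  else if has_auth && has_disconnect_flow then "wifi_auth_disconnect_sequence"
  else if has_eapol_flow then "wifi_eapol_handshake_sequence"
  else if has_system_maintenance then "system_maintenance_sequence"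
  else if has_wifi_scan_error then "wifi_system_sequence"
  else if has_device_mgmt_report || has_device_mgmt_process || has_device_mgmt_category then "device_management_sequence"
  else if has_assoc_failure && (has_auth || has_disconnect || has_disconnect_flow) then "wifi_auth_disconnect_sequence"
  else if has_assoc_failure then "wifi_assoc_failure_sequence"
  else if has_roam_flow then "wifi_roam_sequence"
  else if has_dns_anomaly then "network_dns_anomaly_sequence"
  else if has_assoc_flow then "wifi_association_sequence"
  else if has_auth && !has_disconnect then "wifi_auth_sequence"
  else if has_disconnect && PySem.Set.issubset event_types ["disconnect"] then "wifi_disconnect_sequence"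
  else if has_disconnect_flow then "wifi_disconnect_sequence"
  else "wifi_unknown_sequence"

-- ===== PORT B =====
-- Port of B: one pass over event_types accumulating a flag set via a per-event table, then a priority rule table.
def pvEventFlags : PySem.Dict String (List String) := PySem.Dict.ofList [
  ("auth_request", ["auth"]), ("auth_response", ["auth"]),
  ("disconnect", ["disconnect_flow"]),
  ("eapol_key", ["eapol"]), ("eapol_packet", ["eapol"]), ("eap_packet", ["eapol"]),
  ("station_join", ["assoc"]),
  ("assoc_success", ["assoc", "roam"]), ("reassoc_request", ["assoc", "roam"]), ("reassoc_response", ["assoc", "roam"]),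
  ("station_table_insert", ["assoc"]), ("cfg80211_assoc_request_handler", ["assoc"]), ("station_qos_map_support", ["assoc"]),
  ("assoc_tracker_failure", ["assoc_failure"]),
  ("reassoc_processing_time", ["roam"]), ("fast_transition_roam", ["roam"]), ("rrm_neighbor_response", ["roam"]),
  ("dns_timeout", ["dns"]),
  ("device_config_report", ["mgmt_report"]),
  ("wifi_scan_error", ["scan_error"]),
  ("system_cache_drop", ["maintenance"]),
  ("station_delete", ["disconnect_flow"]), ("cfg80211_station_delete", ["disconnect_flow"]),
  ("cfg80211_station_delete_start", ["disconnect_flow"]), ("cfg80211_station_delete_end", ["disconnect_flow"]),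
  ("station_table_delete", ["disconnect_flow"]), ("driver_missing_station_entry", ["disconnect_flow"]),
  ("deauth_sent", ["disconnect_flow"]), ("wifi_key_delete", ["disconnect_flow"])]

def derive_canonical_event_type_py_alt (event_types : List String) (event_categories : Option (List String)) (process_names : Option (List String)) : String :=
  let acc := event_types.foldl
    (fun (acc : Bool × PySem.Set String) event_type =>
      (acc.1 || event_type != "unknown", PySem.Set.update acc.2 (PySem.Dict.getD pvEventFlags event_type [])))
    (false, PySem.Set.empty)
  let known := acc.1
  let flags := acc.2
  if !known then "wifi_unknown_sequence" else
  let mgmt := flags.contains "mgmt_report"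
    || (process_names.getD []).any (fun p => ["mcad", "syswrapper", "logread", "procd"].contains (PySem.Str.lower p))
    || (event_categories.getD []).any (fun c => ["device_management", "controller_config"].contains c)
  let rules : List (Bool × String) := [
    (flags.contains "auth" && flags.contains "disconnect_flow", "wifi_auth_disconnect_sequence"),
    (flags.contains "eapol", "wifi_eapol_handshake_sequence"),
    (flags.contains "maintenance", "system_maintenance_sequence"),
    (flags.contains "scan_error", "wifi_system_sequence"),
    (mgmt, "device_management_sequence"),
    (flags.contains "assoc_failure" && (flags.contains "auth" || flags.contains "disconnect_flow"), "wifi_auth_disconnect_sequence"),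
    (flags.contains "assoc_failure", "wifi_assoc_failure_sequence"),
    (flags.contains "roam", "wifi_roam_sequence"),
    (flags.contains "dns", "network_dns_anomaly_sequence"),
    (flags.contains "assoc", "wifi_association_sequence"),
    (flags.contains "auth", "wifi_auth_sequence"),
    (flags.contains "disconnect_flow", "wifi_disconnect_sequence")]
  match rules.find? (fun r => r.1) with
  | some r => r.2
  | none => "wifi_unknown_sequence"

-- ===== PRECONDITION & SPEC =====
def Spec_derive_canonical_event_type_py (event_types : List String) (event_categories : Option (List String)) (process_names : Option (List String)) (out : String) : Prop := out = derive_canonical_event_type_py_alt event_types event_categories process_names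
instance (event_types : List String) (event_categories : Option (List String)) (process_names : Option (List String)) (out : String) : Decidable (Spec_derive_canonical_event_type_py event_types event_categories process_names out) := by unfold Spec_derive_canonical_event_type_py; infer_instance

-- ===== CLAIM (what is proved, stated in full; the proofs are below) =====
def Claim_equal_derive_canonical_event_type_py : Prop := ∀ (event_types : List String) (event_categories : Option (List String)) (process_names : Option (List String)), Dom_derive_canonical_event_type_py event_types event_categories process_names → Spec_derive_canonical_event_type_py event_types event_categories process_names (derive_canonical_event_type_py event_types event_categories process_names)

-- ===== LEMMAS AND PROOFS =====

def pvFlagL : List (String × List String) := [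
  ("auth_request", ["auth"]), ("auth_response", ["auth"]),
  ("disconnect", ["disconnect_flow"]),
  ("eapol_key", ["eapol"]), ("eapol_packet", ["eapol"]), ("eap_packet", ["eapol"]),
  ("station_join", ["assoc"]),
  ("assoc_success", ["assoc", "roam"]), ("reassoc_request", ["assoc", "roam"]), ("reassoc_response", ["assoc", "roam"]),
  ("station_table_insert", ["assoc"]), ("cfg80211_assoc_request_handler", ["assoc"]), ("station_qos_map_support", ["assoc"]),
  ("assoc_tracker_failure", ["assoc_failure"]),
  ("reassoc_processing_time", ["roam"]), ("fast_transition_roam", ["roam"]), ("rrm_neighbor_response", ["roam"]),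
  ("dns_timeout", ["dns"]),
  ("device_config_report", ["mgmt_report"]),
  ("wifi_scan_error", ["scan_error"]),
  ("system_cache_drop", ["maintenance"]),
  ("station_delete", ["disconnect_flow"]), ("cfg80211_station_delete", ["disconnect_flow"]),
  ("cfg80211_station_delete_start", ["disconnect_flow"]), ("cfg80211_station_delete_end", ["disconnect_flow"]),
  ("station_table_delete", ["disconnect_flow"]), ("driver_missing_station_entry", ["disconnect_flow"]),
  ("deauth_sent", ["disconnect_flow"]), ("wifi_key_delete", ["disconnect_flow"])]

set_option maxHeartbeats 1600000 in
theorem pvEventFlags_eq : pvEventFlags = PySem.Dict.mk pvFlagL := by decide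

theorem pvGetD_cons (k : String) (v : List String) (rest : List (String × List String)) (e : String) :
    PySem.Dict.getD (PySem.Dict.mk ((k, v) :: rest)) e [] =
      if k == e then v else PySem.Dict.getD (PySem.Dict.mk rest) e [] := by
  simp only [PySem.Dict.getD, PySem.Dict.get?_mk_cons]
  split <;> rfl

theorem pvGetD_contains (ps : List (String × List String)) (e f : String)
    (h : (ps.map Prod.fst).Nodup) :
    (PySem.Dict.getD (PySem.Dict.mk ps) e []).contains f
      = ps.any (fun kv => kv.1 == e && kv.2.contains f) := by
  induction ps with
  | nil => rfl
  | cons p rest ih =>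
    obtain ⟨k, v⟩ := p
    rw [List.map_cons, List.nodup_cons] at h
    rw [pvGetD_cons, List.any_cons]
    by_cases hk : (k == e) = true
    · rw [if_pos hk]
      have he : k = e := by simpa using hk
      have hz : rest.any (fun kv => kv.1 == e && kv.2.contains f) = false := by
        rw [List.any_eq_false]
        rintro ⟨k', v'⟩ hmem
        have hk' : (k' == e) = false := by
          apply beq_eq_false_iff_ne.2
          intro hq
          apply h.1
          exact List.mem_map.2 ⟨(k', v'), hmem, (hq.trans he.symm)⟩
        simp [hk']
      rw [hz]
      simp [hk]
    · rw [if_neg hk, ih h.2]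
      have hkf : (k == e) = false := by simpa using hk
      simp [hkf]

set_option maxHeartbeats 1600000 in
theorem pvFlagAny (e f : String) : (PySem.Dict.getD pvEventFlags e []).contains f
    = pvFlagL.any (fun kv => kv.1 == e && kv.2.contains f) := by
  rw [pvEventFlags_eq]
  exact pvGetD_contains pvFlagL e f (by decide)

set_option maxHeartbeats 1600000 in
theorem pvFlag_auth (e : String) : (PySem.Dict.getD pvEventFlags e []).contains "auth" = (e == "auth_request" || e == "auth_response") := by
  rw [pvFlagAny, Bool.eq_iff_iff]
  simp [pvFlagL]
  aesop

set_option maxHeartbeats 1600000 in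
theorem pvFlag_eapol (e : String) : (PySem.Dict.getD pvEventFlags e []).contains "eapol" = ["eapol_key", "eapol_packet", "eap_packet"].contains e := by
  rw [pvFlagAny, Bool.eq_iff_iff]
  simp [pvFlagL]
  aesop

set_option maxHeartbeats 1600000 in
theorem pvFlag_assoc (e : String) : (PySem.Dict.getD pvEventFlags e []).contains "assoc" = ["station_join", "assoc_success", "reassoc_request", "reassoc_response", "station_table_insert", "cfg80211_assoc_request_handler", "station_qos_map_support"].contains e := by
  rw [pvFlagAny, Bool.eq_iff_iff]
  simp [pvFlagL]
  aesop

set_option maxHeartbeats 1600000 in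
theorem pvFlag_af (e : String) : (PySem.Dict.getD pvEventFlags e []).contains "assoc_failure" = (e == "assoc_tracker_failure") := by
  rw [pvFlagAny, Bool.eq_iff_iff]
  simp [pvFlagL]
  aesop

set_option maxHeartbeats 1600000 in
theorem pvFlag_roam (e : String) : (PySem.Dict.getD pvEventFlags e []).contains "roam" = ["reassoc_request", "reassoc_response", "assoc_success", "reassoc_processing_time", "fast_transition_roam", "rrm_neighbor_response"].contains e := by
  rw [pvFlagAny, Bool.eq_iff_iff]
  simp [pvFlagL]
  aesop

set_option maxHeartbeats 1600000 in
theorem pvFlag_dns (e : String) : (PySem.Dict.getD pvEventFlags e []).contains "dns" = (e == "dns_timeout") := by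
  rw [pvFlagAny, Bool.eq_iff_iff]
  simp [pvFlagL]
  aesop

set_option maxHeartbeats 1600000 in
theorem pvFlag_mgmtR (e : String) : (PySem.Dict.getD pvEventFlags e []).contains "mgmt_report" = (e == "device_config_report") := by
  rw [pvFlagAny, Bool.eq_iff_iff]
  simp [pvFlagL]
  aesop

set_option maxHeartbeats 1600000 in
theorem pvFlag_scan (e : String) : (PySem.Dict.getD pvEventFlags e []).contains "scan_error" = (e == "wifi_scan_error") := by
  rw [pvFlagAny, Bool.eq_iff_iff]
  simp [pvFlagL]
  aesop

set_option maxHeartbeats 1600000 in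
theorem pvFlag_maint (e : String) : (PySem.Dict.getD pvEventFlags e []).contains "maintenance" = (e == "system_cache_drop") := by
  rw [pvFlagAny, Bool.eq_iff_iff]
  simp [pvFlagL]
  aesop

set_option maxHeartbeats 1600000 in
theorem pvFlag_dflow (e : String) : (PySem.Dict.getD pvEventFlags e []).contains "disconnect_flow" = ["station_delete", "cfg80211_station_delete", "cfg80211_station_delete_start", "cfg80211_station_delete_end", "station_table_delete", "driver_missing_station_entry", "deauth_sent", "wifi_key_delete", "disconnect"].contains e := by
  rw [pvFlagAny, Bool.eq_iff_iff]
  simp [pvFlagL]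
  aesop

theorem pvContains_update (s : PySem.Set String) (xs : List String) (f : String) :
    (PySem.Set.update s xs).contains f = (s.contains f || xs.contains f) := by
  induction xs generalizing s with
  | nil => simp [PySem.Set.update]
  | cons x xs ih =>
    simp only [PySem.Set.update, List.foldl_cons] at *
    rw [ih]
    by_cases hx : f = x <;> simp [PySem.Set.add, hx] <;> split_ifs <;> simp_all

theorem pvFold_fst (l : List String) (b : Bool) (s : PySem.Set String) :
    (l.foldl (fun (acc : Bool × PySem.Set String) event_type =>
      (acc.1 || event_type != "unknown", PySem.Set.update acc.2 (PySem.Dict.getD pvEventFlags event_type []))) (b, s)).1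
    = (b || l.any (fun e => e != "unknown")) := by
  induction l generalizing b s with
  | nil => simp
  | cons x xs ih => simp [ih, Bool.or_assoc]

theorem pvFold_snd (l : List String) (b : Bool) (s : PySem.Set String) (f : String) :
    ((l.foldl (fun (acc : Bool × PySem.Set String) event_type =>
      (acc.1 || event_type != "unknown", PySem.Set.update acc.2 (PySem.Dict.getD pvEventFlags event_type []))) (b, s)).2).contains f
    = (s.contains f || l.any (fun e => (PySem.Dict.getD pvEventFlags e []).contains f)) := by
  induction l generalizing b s with
  | nil => simp
  | cons x xs ih => simp only [List.foldl_cons, List.any_cons, ih, pvContains_update, Bool.or_assoc]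

theorem pvOfList_isEmpty (xs : List String) : (PySem.Set.ofList xs).isEmpty = xs.isEmpty := by
  cases xs with
  | nil => rfl
  | cons x xs =>
    have hx : x ∈ PySem.Set.ofList (x :: xs) := (PySem.Set.mem_ofList _ _).2 (by simp)
    cases h : PySem.Set.ofList (x :: xs) with
    | nil => rw [h] at hx; cases hx
    | cons y ys => rfl

theorem pvInter_any (lit l : List String) :
    (!(PySem.Set.inter (PySem.Set.ofList lit) (PySem.Set.ofList l)).isEmpty)
    = l.any (fun p => lit.contains p) := by
  rw [Bool.eq_iff_iff, Bool.not_eq_true', List.isEmpty_eq_false_iff_exists_mem]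
  simp only [PySem.Set.inter, List.mem_filter, List.any_eq_true, PySem.Set.mem_ofList,
    List.contains_eq_mem, decide_eq_true_eq]
  aesop

theorem pvAny_two (l : List String) (a b : String) :
    l.any (fun e => e == a || e == b) = (l.contains a || l.contains b) := by
  rw [Bool.eq_iff_iff]
  simp only [List.any_eq_true, Bool.or_eq_true, beq_iff_eq, List.contains_eq_mem, decide_eq_true_eq]
  aesop

theorem pvAny_one (l : List String) (a : String) :
    l.any (fun e => e == a) = l.contains a := by
  rw [Bool.eq_iff_iff]
  simp only [List.any_eq_true, beq_iff_eq, List.contains_eq_mem, decide_eq_true_eq]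
  aesop

set_option maxHeartbeats 1600000 in
theorem pvCascade : ∀ (auth disc eapol assoc af roam dns mgmt scan maint dflow onlyd : Bool),
    (disc = true → dflow = true) →
    (if auth && disc then "wifi_auth_disconnect_sequence"
     else if auth && dflow then "wifi_auth_disconnect_sequence"
     else if eapol then "wifi_eapol_handshake_sequence"
     else if maint then "system_maintenance_sequence"
     else if scan then "wifi_system_sequence"
     else if mgmt then "device_management_sequence"
     else if af && (auth || disc || dflow) then "wifi_auth_disconnect_sequence"
     else if af then "wifi_assoc_failure_sequence"
     else if roam then "wifi_roam_sequence"
     else if dns then "network_dns_anomaly_sequence"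
     else if assoc then "wifi_association_sequence"
     else if auth && !disc then "wifi_auth_sequence"
     else if disc && onlyd then "wifi_disconnect_sequence"
     else if dflow then "wifi_disconnect_sequence"
     else "wifi_unknown_sequence")
    = (match List.find? (fun r => r.1) [
        (auth && dflow, "wifi_auth_disconnect_sequence"),
        (eapol, "wifi_eapol_handshake_sequence"),
        (maint, "system_maintenance_sequence"),
        (scan, "wifi_system_sequence"),
        (mgmt, "device_management_sequence"),
        (af && (auth || dflow), "wifi_auth_disconnect_sequence"),
        (af, "wifi_assoc_failure_sequence"),
        (roam, "wifi_roam_sequence"),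
        (dns, "network_dns_anomaly_sequence"),
        (assoc, "wifi_association_sequence"),
        (auth, "wifi_auth_sequence"),
        (dflow, "wifi_disconnect_sequence")] with
      | some r => r.2
      | none => "wifi_unknown_sequence") := by
  decide

set_option maxHeartbeats 1600000 in
theorem pvMain (event_types : List String) (event_categories : Option (List String)) (process_names : Option (List String)) :
    derive_canonical_event_type_py event_types event_categories process_names
    = derive_canonical_event_type_py_alt event_types event_categories process_names := by
  unfold derive_canonical_event_type_py derive_canonical_event_type_py_alt
  by_cases hk : event_types.any (fun e => e != "unknown") = true
  · have hne : event_types.isEmpty = false := by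
      rcases List.any_eq_true.1 hk with ⟨x, hx, _⟩
      cases event_types <;> simp_all
    have hfil : (PySem.Set.ofList (event_types.filter (fun event_type => event_type != "unknown"))).isEmpty = false := by
      rw [pvOfList_isEmpty]
      rcases List.any_eq_true.1 hk with ⟨x, hx, hxu⟩
      rw [List.isEmpty_eq_false_iff_exists_mem]
      exact ⟨x, List.mem_filter.2 ⟨hx, hxu⟩⟩
    have himp : event_types.contains "disconnect" = true →
        event_types.any (fun event_type => ["station_delete", "cfg80211_station_delete", "cfg80211_station_delete_start", "cfg80211_station_delete_end", "station_table_delete", "driver_missing_station_entry", "deauth_sent", "wifi_key_delete", "disconnect"].contains event_type) = true := by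
      intro h
      rw [List.any_eq_true]
      refine ⟨"disconnect", by simpa using h, by decide⟩
    simp only [hne, hfil, pvFold_fst, pvFold_snd, hk, Bool.false_or, Bool.not_true,
      pvFlag_auth, pvFlag_eapol, pvFlag_assoc, pvFlag_af, pvFlag_roam,
      pvFlag_dns, pvFlag_mgmtR, pvFlag_scan, pvFlag_maint, pvFlag_dflow,
      pvAny_two, pvAny_one, pvInter_any, List.any_map, Function.comp_def,
      Bool.false_eq_true, if_false]
    exact pvCascade _ _ _ _ _ _ _ _ _ _ _ _ himp
  · have hk' : event_types.any (fun e => e != "unknown") = false := by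
      simpa using hk
    have hfil : (PySem.Set.ofList (event_types.filter (fun event_type => event_type != "unknown"))).isEmpty = true := by
      rw [pvOfList_isEmpty, List.isEmpty_iff, List.filter_eq_nil_iff]
      intro a ha
      have := List.any_eq_false.1 hk' a ha
      simpa using this
    simp only [pvFold_fst, Bool.false_or, hk', Bool.not_false, if_true, hfil, ite_self]

-- ===== VERDICT (by name: the statement is the Claim_ definition above) =====
theorem derive_canonical_event_type_py_spec : Claim_equal_derive_canonical_event_type_py := by
  intro event_types event_categories process_names _
  unfold Spec_derive_canonical_event_type_py
  exact pvMain event_types event_categories process_names
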